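-- pv_equiv track=rewrite | github.com/rizveeredwan/latex-merger | latex_merger.py | comment_portion_removal
-- ===== SOURCE A (Python) =====
-- def comment_portion_removal(line):
--     for i in range(0, len(line)):
--         if line[i] == '%':
--             if i == 0:
--                 return ""
--             elif line[i-1] != "\\":
--                 return line[0:i]
--     return line
-- ===== SOURCE B (Python) =====
-- def comment_portion_removal(line):
--     i = line.find('%')
--     if i == -1:
--         return line
--     if i == 0:
--         return ""
--     if line[i - 1] != '\\':
--         return line[:i]
--     return line[:i + 1] + comment_portion_removal(line[i + 1:])
-- ===== Notes on version B (the rewrite author's own statement) =====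
-- stated objective: faster
-- what changed: Replaces A's per-character Python loop with str.find jumps to each comment-marker candidate, recursing on the remaining suffix past escaped occurrences.
import Mathlib
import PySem

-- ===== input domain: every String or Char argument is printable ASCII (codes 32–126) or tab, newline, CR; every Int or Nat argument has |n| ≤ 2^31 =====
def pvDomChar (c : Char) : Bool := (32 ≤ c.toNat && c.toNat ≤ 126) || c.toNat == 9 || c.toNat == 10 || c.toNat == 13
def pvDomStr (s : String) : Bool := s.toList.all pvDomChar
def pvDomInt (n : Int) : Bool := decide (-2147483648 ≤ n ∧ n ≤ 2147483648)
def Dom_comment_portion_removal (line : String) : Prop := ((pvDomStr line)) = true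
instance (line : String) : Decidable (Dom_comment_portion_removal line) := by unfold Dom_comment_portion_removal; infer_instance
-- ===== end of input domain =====

-- B replaces A's per-character index loop by find-driven jumps to each comment-marker candidate,
-- recursing past escaped occurrences; equivalence of the return values is proved below.


-- ===== PORT A =====
-- A's loop 'for i in range(0, len(line))' with early returns, as index recursion over the
-- character list; line[0:i] with 0 ≤ i ≤ len is exactly List.take i.
def pvAGo (cs : List Char) (i : Nat) : List Char :=
  if h : i < cs.length then
    if cs[i] = '%' then
      if i = 0 then []
      else if cs[i - 1]! ≠ '\\' then cs.take i
      else pvAGo cs (i + 1)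
    else pvAGo cs (i + 1)
  else cs
termination_by cs.length - i

def comment_portion_removal (line : String) : String :=
  String.ofList (pvAGo line.toList 0)

-- ===== PORT B =====
-- B: i = line.find('%'); -1 → whole line; 0 → ""; unescaped → line[:i];
-- escaped → line[:i+1] + recurse on line[i+1:]  (nonnegative slices are take/drop).
def pvBGo (cs : List Char) : List Char :=
  let i := PySem.Chars.find cs ['%']
  if h1 : i = -1 then cs
  else if h2 : i = 0 then []
  else if cs[i.toNat - 1]! ≠ '\\' then cs.take i.toNat
  else cs.take (i.toNat + 1) ++ pvBGo (cs.drop (i.toNat + 1))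
termination_by cs.length
decreasing_by
  have hinf : ['%'] <:+: cs := (PySem.Chars.find_ne_neg_one_iff cs ['%']).mp h1
  obtain ⟨s, t, hst⟩ := hinf
  simp [← hst]

def comment_portion_removal_alt (line : String) : String :=
  String.ofList (pvBGo line.toList)

-- ===== PRECONDITION & SPEC =====
def Spec_comment_portion_removal (line : String) (out : String) : Prop := out = comment_portion_removal_alt line
instance (line : String) (out : String) : Decidable (Spec_comment_portion_removal line out) := by unfold Spec_comment_portion_removal; infer_instance

-- ===== CLAIM (what is proved, stated in full; the proofs are below) =====
def Claim_equal_comment_portion_removal : Prop := ∀ (line : String), Dom_comment_portion_removal line → Spec_comment_portion_removal line (comment_portion_removal line)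

-- ===== LEMMAS AND PROOFS =====

-- Reference truncation: cut at the first '%' whose previous character (p for the head) is not '\\'.
def pvCut (p : Option Char) : List Char → List Char
  | [] => []
  | c :: rest => if c = '%' ∧ p ≠ some '\\' then [] else c :: pvCut (some c) rest

theorem pvCut_congr (p q : Option Char) (cs : List Char)
    (hp : p ≠ some '\\') (hq : q ≠ some '\\') : pvCut p cs = pvCut q cs := by
  cases cs with
  | nil => rfl
  | cons c rest => simp [pvCut, hp, hq]

theorem pvCut_no_pct (p : Option Char) (cs : List Char) (h : '%' ∉ cs) :
    pvCut p cs = cs := by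
  induction cs generalizing p with
  | nil => rfl
  | cons c rest ih =>
    simp at h
    rw [pvCut, if_neg (by intro hx; exact h.1 hx.1.symm)]
    rw [ih (some c) h.2]

theorem pvAGo_inv (cs : List Char) :
    ∀ i, i ≤ cs.length →
      pvAGo cs i = cs.take i ++ pvCut (if h : i = 0 then none else some cs[i - 1]!) (cs.drop i) := by
  intro i
  induction hn : cs.length - i using Nat.strong_induction_on generalizing i with
  | _ n ih =>
  intro hle
  by_cases hlt : i < cs.length
  · have hdrop : cs.drop i = cs[i] :: cs.drop (i + 1) := (List.getElem_cons_drop hlt).symm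
    have hgi : cs[i]! = cs[i] := getElem!_pos cs i hlt
    have htake : cs.take (i + 1) = cs.take i ++ [cs[i]] := by
      rw [List.take_add_one]
      simp [List.getElem?_eq_getElem hlt]
    have ihnext : pvAGo cs (i + 1)
        = cs.take (i + 1) ++ pvCut (some cs[i]!) (cs.drop (i + 1)) := by
      have := ih (cs.length - (i + 1)) (by omega) (i + 1) rfl (by omega)
      simpa using this
    rw [pvAGo, dif_pos hlt]
    by_cases hc : cs[i] = '%'
    · rw [if_pos hc]
      by_cases h0 : i = 0
      · subst h0
        rw [if_pos rfl, dif_pos rfl, hdrop, pvCut, if_pos ⟨hc, by simp⟩]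
        simp
      · rw [if_neg h0, dif_neg h0, hdrop, pvCut]
        by_cases hprev : cs[i - 1]! = '\\'
        · rw [if_neg (by simp [hprev]), if_neg (by simp [hprev])]
          rw [ihnext, htake, hgi, List.append_assoc]
          simp only [List.singleton_append]
        · rw [if_pos hprev, if_pos ⟨hc, by simpa using hprev⟩]
          simp
    · rw [if_neg hc, ihnext, htake, hdrop, pvCut,
        if_neg (by intro hx; exact hc hx.1), hgi, List.append_assoc]
      simp only [List.singleton_append]
  · have hi : i = cs.length := by omega
    subst hi
    rw [pvAGo, dif_neg hlt]
    simp [pvCut]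

theorem pvBGo_eq_pvCut (cs : List Char) : pvBGo cs = pvCut none cs := by
  induction hn : cs.length using Nat.strong_induction_on generalizing cs with
  | _ n ih =>
  subst hn
  rw [pvBGo]
  set i := PySem.Chars.find cs ['%'] with hi
  by_cases h1 : i = -1
  · have hnin : ¬ ['%'] <:+: cs := (PySem.Chars.find_eq_neg_one_iff cs ['%']).mp h1
    have hmem : '%' ∉ cs := by
      intro hm
      obtain ⟨s, t, hst⟩ := List.mem_iff_append.mp hm
      exact hnin ⟨s, t, by simp [hst]⟩
    rw [dif_pos h1, pvCut_no_pct none cs hmem]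
  · have hspec := PySem.Chars.findFrom_natCast_spec cs ['%'] 0 (by omega)
      (by simp only [Nat.cast_zero, PySem.Chars.findFrom_zero]; rw [← hi]; exact h1)
    simp only [Nat.cast_zero, PySem.Chars.findFrom_zero] at hspec
    obtain ⟨-, hpre, hmin⟩ := hspec
    rw [← hi] at hpre hmin
    have hnonneg : 0 ≤ i := by
      have := PySem.Chars.neg_one_le_find cs ['%']
      rw [← hi] at this; omega
    set m := i.toNat with hm
    have hpct : cs.drop m = '%' :: cs.drop (m + 1) := by
      obtain ⟨t, ht⟩ := hpre
      have hdt : cs.drop (m + 1) = t := by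
        have hdd : cs.drop (m + 1) = (cs.drop m).drop 1 := by
          rw [List.drop_drop, Nat.add_comm]
        rw [hdd, ← ht]
        rfl
      rw [← ht, hdt]
      rfl
    have hmlt : m < cs.length := by
      have hlen : (cs.drop m).length > 0 := by rw [hpct]; simp
      simp at hlen; omega
    have hbefore : ∀ j, j < m → cs[j]! ≠ '%' := by
      intro j hj hcj
      have hpref : ['%'] <+: cs.drop j := by
        have hjl : j < cs.length := by omega
        have hdj : cs.drop j = cs[j] :: cs.drop (j + 1) := (List.getElem_cons_drop hjl).symm
        rw [hdj, ← getElem!_pos cs j hjl, hcj]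
        exact ⟨cs.drop (j + 1), rfl⟩
      exact hmin j (by omega) (by omega) hpref
    -- characterize pvCut through the '%'-free prefix
    have hskip : ∀ (pre : List Char) (p : Option Char) (rest : List Char), '%' ∉ pre →
        pvCut p (pre ++ rest)
          = pre ++ pvCut (if pre = [] then p else pre.getLast?) rest := by
      intro pre
      induction pre with
      | nil => intro p rest _; simp
      | cons c cs' ihp =>
        intro p rest hnp
        simp at hnp
        rw [List.cons_append, pvCut, if_neg (by intro hx; exact hnp.1 hx.1.symm)]
        rw [ihp (some c) rest hnp.2]
        cases cs' with
        | nil => simp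
        | cons c' cs'' =>
          rw [List.getLast?_cons_cons]
          simp
    have hsplit : cs = cs.take m ++ cs.drop m := (List.take_append_drop m cs).symm
    have hnp : '%' ∉ cs.take m := by
      intro hmem
      obtain ⟨j, hj, hcj⟩ := List.getElem_of_mem hmem
      have hjm : j < m := by simp at hj; omega
      have hjl : j < cs.length := by omega
      have hcj' : cs[j]! = '%' := by
        rw [getElem!_pos cs j hjl, ← hcj]
        simp
      exact hbefore j hjm hcj'
    by_cases h2 : i = 0
    · have hc0 : cs = '%' :: cs.drop 1 := by
        have hp0 := hpct
        rw [hm, h2] at hp0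
        simpa using hp0
      rw [dif_neg h1, dif_pos h2, hc0, pvCut, if_pos ⟨rfl, by simp⟩]
    · have hmpos : 0 < m := by omega
      have hne : cs.take m ≠ [] := by
        intro h
        have hl := congrArg List.length h
        rw [List.length_take, List.length_nil] at hl
        omega
      have hcut : pvCut none cs
          = cs.take m ++ pvCut ((cs.take m).getLast?) (cs.drop m) := by
        conv_lhs => rw [hsplit]
        rw [hskip (cs.take m) none (cs.drop m) hnp, if_neg hne]
      have hlast : (cs.take m).getLast? = some cs[m - 1]! := by
        rw [List.getLast?_eq_getElem?]
        have hlen : (cs.take m).length = m := by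
          rw [List.length_take]; omega
        rw [hlen]
        have hml : m - 1 < cs.length := by omega
        rw [List.getElem?_take, if_pos (show m - 1 < m by omega),
          List.getElem?_eq_getElem hml, getElem!_pos cs (m - 1) hml]
      by_cases hprev : cs[m - 1]! = '\\'
      · rw [dif_neg h1, dif_neg h2, if_neg (by simp [hprev])]
        rw [hcut, hlast, hprev, hpct, pvCut, if_neg (by simp)]
        have htk : cs.take (m + 1) = cs.take m ++ ['%'] := by
          rw [List.take_add_one, List.getElem?_eq_getElem hmlt]
          have hcm : cs[m] = '%' := by
            have hh : (cs.drop m).head? = some '%' := by rw [hpct]; rfl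
            rw [List.head?_drop, List.getElem?_eq_getElem hmlt] at hh
            simpa using hh
          simp [hcm]
        rw [htk, ih (cs.drop (m + 1)).length (by simp; omega) (cs.drop (m + 1)) rfl]
        rw [pvCut_congr none (some '%') _ (by simp) (by simp), List.append_assoc]
        simp only [List.singleton_append]
      · rw [dif_neg h1, dif_neg h2, if_pos hprev]
        rw [hcut, hlast, hpct, pvCut, if_pos ⟨rfl, by simpa using hprev⟩]
        simp

-- ===== VERDICT (by name: the statement is the Claim_ definition above) =====
theorem comment_portion_removal_spec : Claim_equal_comment_portion_removal := by
  intro line _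
  unfold Spec_comment_portion_removal comment_portion_removal comment_portion_removal_alt
  rw [pvBGo_eq_pvCut]
  exact congrArg String.ofList (by simpa using pvAGo_inv line.toList 0 (by omega))
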